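-- pv_equiv track=rewrite | github.com/mentebim/Q_Lab_HL | RESEARCH_AGENT/sync_back.py | syncable_paths
-- ===== SOURCE A (Python) =====
-- from typing import Any
--
-- def normalize_paths(paths: list[str]) -> list[str]:
--     return [path.rstrip("/") for path in paths]
--
-- def syncable_paths(manifest: dict[str, Any]) -> list[str]:
--     base = set(normalize_paths(list(manifest.get("editable_paths", []))))
--     base.update(normalize_paths(list(manifest.get("outputs", []))))
--     ordered = sorted(base)
--     collapsed: list[str] = []
--     for path in ordered:
--         if any(path == existing or path.startswith(existing + "/") for existing in collapsed):
--             continue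
--         collapsed.append(path)
--     return collapsed
-- ===== SOURCE B (Python) =====
-- def syncable_paths(manifest):
--     base = {p.rstrip("/") for p in manifest.get("editable_paths", [])}
--     base.update(p.rstrip("/") for p in manifest.get("outputs", []))
--     keep = [p for p in base
--             if not any(p[:i] in base for i, ch in enumerate(p) if ch == "/")]
--     return sorted(keep)
-- ===== Notes on version B (the rewrite author's own statement) =====
-- stated objective: alternative
-- what changed: A sorts the path set and rescans the growing collapsed list for a kept prefix of each path; B instead tests each path directly against the set by looking up every '/'-cut prefix of the path, filters first and sorts the kept paths at the end.
import Mathlib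
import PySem

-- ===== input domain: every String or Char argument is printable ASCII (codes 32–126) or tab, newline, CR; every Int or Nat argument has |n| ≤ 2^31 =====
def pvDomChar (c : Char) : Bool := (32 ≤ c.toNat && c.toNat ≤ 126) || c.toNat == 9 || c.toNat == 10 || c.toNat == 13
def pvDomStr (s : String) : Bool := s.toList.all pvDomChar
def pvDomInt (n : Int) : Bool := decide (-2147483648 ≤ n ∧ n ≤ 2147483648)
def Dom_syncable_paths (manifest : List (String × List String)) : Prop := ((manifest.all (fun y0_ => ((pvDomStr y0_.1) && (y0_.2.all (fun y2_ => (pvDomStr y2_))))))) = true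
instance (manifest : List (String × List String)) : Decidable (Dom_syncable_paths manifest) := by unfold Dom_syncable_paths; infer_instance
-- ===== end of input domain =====

-- B replaces A's rescan of the growing collapsed list by a direct ancestor test — each path
-- keeps iff none of its '/'-cut prefixes is in the path set — filtering before sorting
-- (objective: alternative decomposition, same observable result).
-- Both ports model Python strings internally as their code-point lists (exact; mapped back
-- with String.ofList at the end), and s.rstrip("/") is hand-ported as dropping trailing '/'
-- code points (exact: rstrip with an explicit chars argument removes exactly those trailing
-- characters).
def pvRstripSlash (s : String) : List Char :=
  (s.toList.reverse.dropWhile (fun c => c == '/')).reverse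

-- ===== PORT A =====
def normalize_paths_port (paths : List String) : List (List Char) :=
  paths.map pvRstripSlash

def syncable_paths (manifest : List (String × List String)) : List String :=
  let base : PySem.Set (List Char) :=
    PySem.Set.ofList (normalize_paths_port (PySem.Dict.getD (PySem.Dict.mk manifest) "editable_paths" []))
  let base := PySem.Set.update base (normalize_paths_port (PySem.Dict.getD (PySem.Dict.mk manifest) "outputs" []))
  let ordered := PySem.List.sorted base (fun x => x) false
  let collapsed := ordered.foldl
    (fun collapsed path =>
      if collapsed.any (fun existing =>
          path == existing || PySem.Chars.startswith path (existing ++ ['/'])) then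
        collapsed
      else
        collapsed ++ [path])
    ([] : List (List Char))
  collapsed.map String.ofList

-- ===== PORT B =====
def syncable_paths_alt (manifest : List (String × List String)) : List String :=
  let base : PySem.Set (List Char) :=
    PySem.Set.ofList ((PySem.Dict.getD (PySem.Dict.mk manifest) "editable_paths" []).map pvRstripSlash)
  let base := PySem.Set.update base ((PySem.Dict.getD (PySem.Dict.mk manifest) "outputs" []).map pvRstripSlash)
  let keep := base.filter (fun p =>
    !((PySem.List.enumerate p 0).any (fun ic =>
        ic.2 == '/' && PySem.Set.contains base (PySem.List.slice p none (some ic.1)))))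
  (PySem.List.sorted keep (fun x => x) false).map String.ofList

-- ===== PRECONDITION & SPEC =====
def Spec_syncable_paths (manifest : List (String × List String)) (out : List String) : Prop := out = syncable_paths_alt manifest
instance (manifest : List (String × List String)) (out : List String) : Decidable (Spec_syncable_paths manifest out) := by unfold Spec_syncable_paths; infer_instance

-- ===== CLAIM (what is proved, stated in full; the proofs are below) =====
def Claim_equal_syncable_paths : Prop := ∀ (manifest : List (String × List String)), Dom_syncable_paths manifest → Spec_syncable_paths manifest (syncable_paths manifest)

-- ===== LEMMAS AND PROOFS =====

-- p has an ancestor in B: some q ∈ B with q ++ "/" a prefix of p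
def pvHasAnc (B : List (List Char)) (p : List Char) : Prop :=
  ∃ q ∈ B, q ++ ['/'] <+: p

-- Bool form of "p has no ancestor in B" (the filter predicate of the proofs)
def pvNoAnc (B : List (List Char)) (p : List Char) : Bool :=
  !(B.any (fun q => (q ++ ['/']).isPrefixOf p))

lemma pvNoAnc_iff (B : List (List Char)) (p : List Char) :
    pvNoAnc B p = true ↔ ¬ pvHasAnc B p := by
  simp [pvNoAnc, pvHasAnc]

-- a strictly proper prefix is lexicographically smaller
lemma pv_lt_cons (q : List Char) (c : Char) (t : List Char) : q < q ++ c :: t := by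
  have : List.Lex (· < ·) q (q ++ c :: t) := by
    induction q with
    | nil => exact List.Lex.nil
    | cons a q ih => exact List.Lex.cons ih
  exact (List.lt_iff_lex_lt _ _).mpr this

lemma pv_lt_of_anc {q p : List Char} (h : q ++ ['/'] <+: p) : q < p := by
  obtain ⟨t, ht⟩ := h
  have : p = q ++ '/' :: t := by rw [← ht]; simp
  rw [this]; exact pv_lt_cons q '/' t

-- B's cut-at-'/' test coincides with the ancestor test
lemma pv_cut_iff (B : List (List Char)) (p : List Char) :
    ((PySem.List.enumerate p 0).any (fun ic =>
        ic.2 == '/' && PySem.Set.contains B (PySem.List.slice p none (some ic.1)))) = true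
      ↔ pvHasAnc B p := by
  simp only [List.any_eq_true, PySem.List.mem_enumerate_iff]
  constructor
  · rintro ⟨ic, ⟨k, hk, rfl⟩, hcond⟩
    simp only [zero_add, PySem.List.slice_to_natCast, Bool.and_eq_true, beq_iff_eq] at hcond
    refine ⟨p.take k, (PySem.Set.contains_iff _ _).mp hcond.2, p.drop (k+1), ?_⟩
    rw [List.append_assoc, List.singleton_append, ← hcond.1, ← List.drop_eq_getElem_cons hk]
    exact List.take_append_drop k p
  · rintro ⟨q, hq, t, ht⟩
    have hp : p = q ++ '/' :: t := by rw [← ht]; simp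
    subst hp
    have hlen : q.length < (q ++ '/' :: t).length := by simp
    refine ⟨(0 + (q.length : Int), (q ++ '/' :: t)[q.length]), ⟨q.length, hlen, rfl⟩, ?_⟩
    simp only [zero_add, PySem.List.slice_to_natCast, Bool.and_eq_true, beq_iff_eq]
    refine ⟨by simp, ?_⟩
    rw [PySem.Set.contains_iff]
    simpa using hq

-- every path with an ancestor in B has a MINIMAL ancestor in B (one with no own ancestor)
lemma pv_min_anc (B : List (List Char)) (p : List Char) (h : pvHasAnc B p) :
    ∃ q₀ ∈ B, (q₀ ++ ['/'] <+: p) ∧ ¬ pvHasAnc B q₀ := by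
  obtain ⟨q, hq, hpre⟩ := h
  induction hn : q.length using Nat.strong_induction_on generalizing q with
  | _ n IH =>
    by_cases hqa : pvHasAnc B q
    · obtain ⟨r, hr, hrpre⟩ := hqa
      have hq_p : q <+: p := ((q.prefix_append ['/']).trans hpre)
      have hrp : r ++ ['/'] <+: p := hrpre.trans hq_p
      have hlt : r.length < n := by
        have := hrpre.length_le
        simp at this; omega
      exact IH r.length hlt r hr hrp rfl
    · exact ⟨q, hq, hpre, hqa⟩

-- A's loop keeps exactly the paths without an ancestor in the whole set
lemma pv_fold_collapse (B : List (List Char)) :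
    ∀ (L acc : List (List Char)),
      (∀ q ∈ acc, q ∈ B ∧ ¬ pvHasAnc B q) →
      (∀ x ∈ L, x ∈ B) →
      (∀ x ∈ L, ∀ q ∈ B, ¬ pvHasAnc B q → q < x → q ∈ acc ∨ q ∈ L) →
      L.Pairwise (· < ·) →
      (∀ x ∈ L, ∀ a ∈ acc, a < x) →
      L.foldl
        (fun collapsed path =>
          if collapsed.any (fun existing =>
              path == existing || PySem.Chars.startswith path (existing ++ ['/'])) then
            collapsed
          else
            collapsed ++ [path]) acc
        = acc ++ L.filter (pvNoAnc B) := by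
  intro L
  induction L with
  | nil => intro acc _ _ _ _ _; simp
  | cons p L' IH =>
    intro acc hacc hmem hcomp hpw habove
    have hpB : p ∈ B := hmem p (by simp)
    have hcond : (acc.any (fun existing =>
        p == existing || PySem.Chars.startswith p (existing ++ ['/']))) = true ↔ pvHasAnc B p := by
      constructor
      · intro hx
        obtain ⟨q, hqa, hor⟩ := List.any_eq_true.mp hx
        rcases Bool.or_eq_true_iff.mp hor with heq | hsw
        · exfalso
          have : q < p := habove p (by simp) q hqa
          rw [beq_iff_eq.mp heq] at this
          exact lt_irrefl _ this
        · exact ⟨q, (hacc q hqa).1, (PySem.Chars.startswith_iff _ _).mp hsw⟩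
      · intro hp
        obtain ⟨q₀, hq₀B, hq₀pre, hq₀no⟩ := pv_min_anc B p hp
        have hlt : q₀ < p := pv_lt_of_anc hq₀pre
        have := hcomp p (by simp) q₀ hq₀B hq₀no hlt
        rcases this with hin | hin
        · exact List.any_eq_true.mpr ⟨q₀, hin, Bool.or_eq_true_iff.mpr
            (Or.inr ((PySem.Chars.startswith_iff _ _).mpr hq₀pre))⟩
        · exfalso
          rcases List.mem_cons.mp hin with rfl | hin'
          · exact lt_irrefl _ hlt
          · have : p < q₀ := (List.pairwise_cons.mp hpw).1 q₀ hin'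
            exact lt_irrefl _ (this.trans hlt)
    simp only [List.foldl_cons]
    by_cases hp : pvHasAnc B p
    · rw [if_pos (hcond.mpr hp)]
      have hfil : (p :: L').filter (pvNoAnc B) = L'.filter (pvNoAnc B) := by
        rw [List.filter_cons_of_neg]
        simp [pvNoAnc_iff, hp]
      rw [hfil]
      exact IH acc hacc (fun x hx => hmem x (by simp [hx]))
        (fun x hx q hqB hqno hqlt => by
          rcases hcomp x (by simp [hx]) q hqB hqno hqlt with h1 | h1
          · exact Or.inl h1
          · rcases List.mem_cons.mp h1 with rfl | h2
            · exact absurd hp hqno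
            · exact Or.inr h2)
        (List.pairwise_cons.mp hpw).2
        (fun x hx a ha => habove x (by simp [hx]) a ha)
    · rw [if_neg (by rw [hcond]; exact hp)]
      have hfil : (p :: L').filter (pvNoAnc B) = p :: L'.filter (pvNoAnc B) := by
        rw [List.filter_cons_of_pos]
        simp [pvNoAnc_iff, hp]
      rw [hfil]
      have hres := IH (acc ++ [p])
        (fun q hq => by
          rcases List.mem_append.mp hq with h1 | h1
          · exact hacc q h1
          · simp at h1; subst h1; exact ⟨hpB, hp⟩)
        (fun x hx => hmem x (by simp [hx]))
        (fun x hx q hqB hqno hqlt => by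
          rcases hcomp x (by simp [hx]) q hqB hqno hqlt with h1 | h1
          · exact Or.inl (List.mem_append.mpr (Or.inl h1))
          · rcases List.mem_cons.mp h1 with rfl | h2
            · exact Or.inl (List.mem_append.mpr (Or.inr (by simp)))
            · exact Or.inr h2)
        (List.pairwise_cons.mp hpw).2
        (fun x hx a ha => by
          rcases List.mem_append.mp ha with h1 | h1
          · exact habove x (by simp [hx]) a h1
          · simp at h1; subst h1; exact (List.pairwise_cons.mp hpw).1 x hx)
      rw [hres, List.append_assoc]
      simp

-- the port's inferred DecidableLT instance, rewritten to the LinearOrder one the sorted lemmas use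
lemma pv_sorted_inst (xs : List (List Char)) :
    PySem.List.sorted xs (fun x => x) false
      = @PySem.List.sorted _ _ _ (@LinearOrder.toDecidableLT _ List.instLinearOrder) xs (fun x => x) false := by
  congr 1

-- sorting commutes with filtering (for a nodup input list)
lemma pv_sorted_filter (B : List (List Char)) (hB : B.Nodup) (g : List Char → Bool) :
    (PySem.List.sorted B (fun x => x) false).filter g
      = PySem.List.sorted (B.filter g) (fun x => x) false := by
  rw [pv_sorted_inst B, pv_sorted_inst (B.filter g)]
  apply Eq.symm
  apply PySem.List.sorted_eq_of_perm_of_pairwise_lt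
  · exact (@PySem.List.sorted_perm _ _ _ (@LinearOrder.toDecidableLT _ List.instLinearOrder) B (fun x => x) false).filter g
  · have hle := PySem.List.sorted_pairwise B (fun x => x)
    have hnd : (@PySem.List.sorted _ _ _ (@LinearOrder.toDecidableLT _ List.instLinearOrder) B (fun x => x) false).Pairwise (fun a b => a ≠ b) :=
      (@PySem.List.sorted_perm _ _ _ (@LinearOrder.toDecidableLT _ List.instLinearOrder) B (fun x => x) false).nodup_iff.mpr hB
    have hlt := (hle.and hnd).imp (fun h => lt_of_le_of_ne h.1 h.2)
    exact hlt.sublist List.filter_sublist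

lemma pv_main (manifest : List (String × List String)) :
    syncable_paths manifest = syncable_paths_alt manifest := by
  simp only [syncable_paths, syncable_paths_alt, normalize_paths_port]
  set B : PySem.Set (List Char) :=
    PySem.Set.update
      (PySem.Set.ofList ((PySem.Dict.getD (PySem.Dict.mk manifest) "editable_paths" []).map pvRstripSlash))
      ((PySem.Dict.getD (PySem.Dict.mk manifest) "outputs" []).map pvRstripSlash) with hBdef
  have hBnd : List.Nodup B := PySem.Set.nodup_update _ _ (PySem.Set.nodup_ofList _)
  congr 1
  have hfold := pv_fold_collapse B (PySem.List.sorted B (fun x => x) false) []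
    (by intro q hq; simp at hq)
    (by intro x hx; exact (PySem.List.sorted_perm B (fun x => x) false).mem_iff.mp hx)
    (by intro x hx q hqB hqno hqlt
        exact Or.inr ((PySem.List.sorted_perm B (fun x => x) false).mem_iff.mpr hqB))
    (by have hle := PySem.List.sorted_pairwise B (fun x => x)
        have hnd : (@PySem.List.sorted _ _ _ (@LinearOrder.toDecidableLT _ List.instLinearOrder) B (fun x => x) false).Pairwise (fun a b => a ≠ b) :=
          (@PySem.List.sorted_perm _ _ _ (@LinearOrder.toDecidableLT _ List.instLinearOrder) B (fun x => x) false).nodup_iff.mpr hBnd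
        have hlt := (hle.and hnd).imp (fun h => lt_of_le_of_ne h.1 h.2)
        rw [pv_sorted_inst]
        exact hlt)
    (by intro x hx a ha; simp at ha)
  rw [hfold, List.nil_append]
  have hpred : B.filter (fun p =>
      !((PySem.List.enumerate p 0).any (fun ic =>
          ic.2 == '/' && PySem.Set.contains B (PySem.List.slice p none (some ic.1)))))
      = B.filter (pvNoAnc B) := by
    apply List.filter_congr
    intro p _
    rcases h : (PySem.List.enumerate p 0).any (fun ic =>
        ic.2 == '/' && PySem.Set.contains B (PySem.List.slice p none (some ic.1))) with _ | _
    · have : ¬ pvHasAnc B p := fun hc => by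
        rw [(pv_cut_iff B p).mpr hc] at h; cases h
      simp [(pvNoAnc_iff B p).mpr this]
    · have : pvHasAnc B p := (pv_cut_iff B p).mp h
      have : ¬ (pvNoAnc B p = true) := fun hc => (pvNoAnc_iff B p).mp hc this
      simp [Bool.not_eq_true] at this
      simp [this]
  rw [hpred, ← pv_sorted_filter B hBnd (pvNoAnc B)]

-- ===== VERDICT (by name: the statement is the Claim_ definition above) =====
theorem syncable_paths_spec : Claim_equal_syncable_paths := by
  intro manifest _
  unfold Spec_syncable_paths
  exact pv_main manifest
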